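-- pv_equiv track=rewrite | github.com/jobakkev/master-project | theorem_unifier.py | post_filter
-- ===== SOURCE A (Python) =====
-- forbidden_strings = [("G","M"), ("V", "N"), ("V", "M")]
--
-- def post_filter(theorem):
--     # interleave quantifiers and types into a single string
--     # ls =  theorem[0] + theorem[1]
--     # ls[::2] = theorem[1]
--     # ls[1::2] = theorem[0]
--     ls = [theorem[1][i//2] if i%2 == 0 else theorem[0][i//2] for i in range(len(theorem[0])+len(theorem[1]))]
--     ls.append('A')
--     string = ''.join(ls)
--     for forbidden in forbidden_strings:
--         if forbidden[0] in string:
--             if forbidden[1] in string[string.find(forbidden[0])+len(forbidden[0]):]: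
--                 return True
--     return False
-- ===== SOURCE B (Python) =====
-- forbidden_strings = [("G","M"), ("V", "N"), ("V", "M")]
--
-- def post_filter(theorem):
--     # interleave kept verbatim (same IndexError behaviour on mismatched lengths)
--     ls = [theorem[1][i//2] if i%2 == 0 else theorem[0][i//2] for i in range(len(theorem[0])+len(theorem[1]))]
--     ls.append('A')
--     # one fused left-to-right pass: remember whether a forbidden first
--     # character ('G' / 'V') has been seen, fire on a matching second one
--     seen_g = False
--     seen_v = False
--     for c in ''.join(ls):
--         if c == 'M':
--             if seen_g or seen_v:
--                 return True
--         elif c == 'N':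
--             if seen_v:
--                 return True
--         elif c == 'G':
--             seen_g = True
--         elif c == 'V':
--             seen_v = True
--     return False
-- ===== Notes on version B (the rewrite author's own statement) =====
-- stated objective: alternative
-- what changed: The three separate substring scans (one 'in'+find+'in' pass per forbidden pair) are fused into a single left-to-right pass over the interleaved characters that tracks two booleans (seen 'G' / seen 'V') and fires as soon as a matching second character appears.
import Mathlib
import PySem

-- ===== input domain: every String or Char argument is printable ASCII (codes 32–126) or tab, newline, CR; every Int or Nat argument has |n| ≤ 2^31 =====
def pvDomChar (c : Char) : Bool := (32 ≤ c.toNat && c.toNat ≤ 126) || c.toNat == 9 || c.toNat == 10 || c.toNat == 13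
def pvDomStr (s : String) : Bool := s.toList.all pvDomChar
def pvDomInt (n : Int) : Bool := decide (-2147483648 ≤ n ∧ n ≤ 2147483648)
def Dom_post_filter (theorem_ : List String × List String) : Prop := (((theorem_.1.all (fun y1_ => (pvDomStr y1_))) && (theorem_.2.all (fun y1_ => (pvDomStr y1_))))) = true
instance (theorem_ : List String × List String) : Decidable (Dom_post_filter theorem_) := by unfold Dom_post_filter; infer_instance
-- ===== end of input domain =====

-- B fuses A's three per-pair substring scans into one left-to-right pass tracking two booleans (alternative decomposition, same cost).


-- ===== PORT A =====
def forbiddenStrings : List (String × String) := [("G","M"), ("V","N"), ("V","M")]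

-- the 'for forbidden in forbidden_strings' loop with its early returns
def postLoop (string : String) : List (String × String) → Bool
  | [] => false
  | f :: rest =>
    if PySem.Str.isIn f.1 string then
      if PySem.Str.isIn f.2 (PySem.Str.slice string (some (PySem.Str.find string f.1 + PySem.Str.len f.1)) none) then
        true
      else postLoop string rest
    else postLoop string rest

def post_filter (theorem_ : List String × List String) : Bool :=
  let ls : List String :=
    (PySem.List.pyRange 0 (PySem.List.len theorem_.1 + PySem.List.len theorem_.2) 1).map
      (fun i => if PySem.Int.mod i 2 = 0
        then PySem.List.pyGetD theorem_.2 (PySem.Int.floordiv i 2) ""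
        else PySem.List.pyGetD theorem_.1 (PySem.Int.floordiv i 2) "")
  let ls := ls ++ ["A"]
  let string := PySem.Str.join "" ls
  postLoop string forbiddenStrings

-- ===== PORT B =====
-- the fused single pass of Source B: seen_g / seen_v accumulators over the chars
def scanPairs : List Char → Bool → Bool → Bool
  | [], _, _ => false
  | c :: t, sg, sv =>
    if c = 'M' then (if sg || sv then true else scanPairs t sg sv)
    else if c = 'N' then (if sv then true else scanPairs t sg sv)
    else if c = 'G' then scanPairs t true sv
    else if c = 'V' then scanPairs t sg true
    else scanPairs t sg sv

def post_filter_alt (theorem_ : List String × List String) : Bool :=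
  let ls : List String :=
    (PySem.List.pyRange 0 (PySem.List.len theorem_.1 + PySem.List.len theorem_.2) 1).map
      (fun i => if PySem.Int.mod i 2 = 0
        then PySem.List.pyGetD theorem_.2 (PySem.Int.floordiv i 2) ""
        else PySem.List.pyGetD theorem_.1 (PySem.Int.floordiv i 2) "")
  let ls := ls ++ ["A"]
  scanPairs (PySem.Str.join "" ls).toList false false

-- ===== PRECONDITION & SPEC =====
-- Pre_ excludes exactly the pairs of lists whose lengths let the interleaving
-- comprehension raise IndexError in Python (both A and B raise there).
def Pre_post_filter (theorem_ : List String × List String) : Prop :=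
  theorem_.2.length = theorem_.1.length ∨ theorem_.2.length = theorem_.1.length + 1
instance (theorem_ : List String × List String) : Decidable (Pre_post_filter theorem_) := by unfold Pre_post_filter; infer_instance
def pvWitness_post_filter : (List String × List String) := (["G"], ["M", "x"])

def Spec_post_filter (theorem_ : List String × List String) (out : Bool) : Prop := out = post_filter_alt theorem_
instance (theorem_ : List String × List String) (out : Bool) : Decidable (Spec_post_filter theorem_ out) := by unfold Spec_post_filter; infer_instance

-- ===== CLAIM (what is proved, stated in full; the proofs are below) =====
def Claim_equal_post_filter : Prop := ∀ (theorem_ : List String × List String), Dom_post_filter theorem_ → Pre_post_filter theorem_ → Spec_post_filter theorem_ (post_filter theorem_)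

-- ===== LEMMAS AND PROOFS =====

-- "b occurs strictly after some occurrence of a" (= after the first one)
def after1 (a b : Char) : List Char → Bool
  | [] => false
  | c :: t => if c = a then t.contains b else after1 a b t

theorem findgo_nonneg (a : Char) (t : List Char) (k : Nat) :
    PySem.Chars.find.go [a] t k = -1 ∨ (k : Int) ≤ PySem.Chars.find.go [a] t k := by
  induction t generalizing k with
  | nil => left; simp [PySem.Chars.find.go]
  | cons c t ih =>
    by_cases h : a = c
    · right; simp [PySem.Chars.find.go, List.isPrefixOf, h]
    · rw [show PySem.Chars.find.go [a] (c :: t) k = PySem.Chars.find.go [a] t (k+1) by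
        simp [PySem.Chars.find.go, List.isPrefixOf, h]]
      rcases ih (k+1) with h0 | h0
      · left; exact h0
      · right; omega

theorem findgo_shift (a : Char) (t : List Char) (k : Nat) :
    PySem.Chars.find.go [a] t k =
      if PySem.Chars.find.go [a] t 0 = -1 then -1 else PySem.Chars.find.go [a] t 0 + k := by
  induction t generalizing k with
  | nil => simp [PySem.Chars.find.go]
  | cons c t ih =>
    by_cases h : a = c
    · simp [PySem.Chars.find.go, List.isPrefixOf, h]
    · rw [show PySem.Chars.find.go [a] (c :: t) k = PySem.Chars.find.go [a] t (k+1) by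
        simp [PySem.Chars.find.go, List.isPrefixOf, h],
        show PySem.Chars.find.go [a] (c :: t) 0 = PySem.Chars.find.go [a] t 1 by
        simp [PySem.Chars.find.go, List.isPrefixOf, h]]
      rw [ih (k+1), ih 1]
      by_cases h0 : PySem.Chars.find.go [a] t 0 = -1
      · simp [h0]
      · have hn : (0 : Int) ≤ PySem.Chars.find.go [a] t 0 := by
          rcases findgo_nonneg a t 0 with h' | h'
          · exact absurd h' h0
          · exact h'
        simp only [h0, if_false]
        split <;> omega

theorem find_cons (a c : Char) (t : List Char) :
    PySem.Chars.find (c :: t) [a] =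
      if c = a then 0
      else if PySem.Chars.find t [a] = -1 then -1 else PySem.Chars.find t [a] + 1 := by
  by_cases h : c = a
  · simp [PySem.Chars.find, PySem.Chars.find.go, List.isPrefixOf, h]
  · have h' : ¬ a = c := fun e => h e.symm
    rw [show PySem.Chars.find (c :: t) [a] = PySem.Chars.find.go [a] t 1 by
      simp [PySem.Chars.find, PySem.Chars.find.go, List.isPrefixOf, h']]
    rw [findgo_shift a t 1]
    simp [PySem.Chars.find, h]

theorem find_single_nonneg (a : Char) (s : List Char) :
    PySem.Chars.find s [a] = -1 ∨ 0 ≤ PySem.Chars.find s [a] := by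
  induction s with
  | nil => left; simp [PySem.Chars.find, PySem.Chars.find.go]
  | cons c t ih =>
    rw [find_cons]
    by_cases h : c = a
    · right; simp [h]
    · simp only [h, if_false]
      rcases ih with h0 | h0
      · left; simp [h0]
      · right; simp only [if_neg (by omega : ¬ PySem.Chars.find t [a] = -1)]; omega

theorem isIn_single (a : Char) (s : List Char) :
    PySem.Chars.isIn [a] s = s.contains a := by
  induction s with
  | nil => simp [PySem.Chars.isIn, PySem.Chars.find, PySem.Chars.find.go]
  | cons c t ih =>
    simp only [PySem.Chars.isIn] at ih ⊢
    rw [find_cons]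
    by_cases h : c = a
    · simp [h]
    · by_cases h0 : PySem.Chars.find t [a] = -1
      · have hca : t.contains a = false := by rw [← ih, h0]; simp
        have hna : a ∉ t := by simpa using hca
        have hac : ¬ a = c := fun e => h e.symm
        simp [h0, hac, hna, h]
      · have hnn : (0 : Int) ≤ PySem.Chars.find t [a] := by
          rcases find_single_nonneg a t with h' | h'
          · exact absurd h' h0
          · exact h'
        have h1 : PySem.Chars.find t [a] + 1 ≠ -1 := by omega
        have hat : a ∈ t := by
          have h2 : t.contains a = true := by rw [← ih]; simp [bne, h0]
          simpa using h2
        simp only [if_neg h, if_neg h0]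
        simp [bne, h1, List.contains_cons, hat]

theorem pairA_eq_after1 (a b : Char) (s : List Char) :
    (if PySem.Chars.isIn [a] s then
        PySem.Chars.isIn [b] (PySem.Chars.slice s (some (PySem.Chars.find s [a] + 1)) none)
      else false) = after1 a b s := by
  induction s with
  | nil => simp [PySem.Chars.isIn, PySem.Chars.find, PySem.Chars.find.go, after1]
  | cons c t ih =>
    by_cases h : c = a
    · have hf : PySem.Chars.find (c :: t) [a] = 0 := by rw [find_cons]; simp [h]
      have hin : PySem.Chars.isIn [a] (c :: t) = true := by
        simp [PySem.Chars.isIn, hf]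
      rw [hin, if_pos rfl, hf]
      have : PySem.Chars.slice (c :: t) (some (0 + 1)) none = t := by
        rw [PySem.Chars.slice_eq_listSlice]
        have h1 := PySem.List.slice_from (c :: t) (a := 0 + 1) (by omega)
        rw [h1]
        norm_num
      rw [this, after1, if_pos h, isIn_single]
    · rw [after1, if_neg h, ← ih]
      have hin : PySem.Chars.isIn [a] (c :: t) = PySem.Chars.isIn [a] t := by
        simp only [PySem.Chars.isIn]
        rw [find_cons]
        by_cases h0 : PySem.Chars.find t [a] = -1
        · simp [h, h0]
        · have hnn : (0 : Int) ≤ PySem.Chars.find t [a] := by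
            rcases find_single_nonneg a t with h' | h'
            · exact absurd h' h0
            · exact h'
          have h1 : PySem.Chars.find t [a] + 1 ≠ -1 := by omega
          simp [h, h0, bne, h1]
      rw [hin]
      by_cases hi : PySem.Chars.isIn [a] t = true
      · rw [if_pos hi, if_pos hi]
        have h0 : ¬ PySem.Chars.find t [a] = -1 := by
          simp [PySem.Chars.isIn] at hi; exact hi
        have hnn : 0 ≤ PySem.Chars.find t [a] := by
          rcases find_single_nonneg a t with h' | h' <;> [exact absurd h' h0; exact h']
        have hf : PySem.Chars.find (c :: t) [a] = PySem.Chars.find t [a] + 1 := by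
          rw [find_cons]; simp [h, h0]
        rw [hf]
        have hs : PySem.Chars.slice (c :: t) (some (PySem.Chars.find t [a] + 1 + 1)) none
            = PySem.Chars.slice t (some (PySem.Chars.find t [a] + 1)) none := by
          simp only [PySem.Chars.slice_eq_listSlice]
          have h1 := PySem.List.slice_from (c :: t) (a := PySem.Chars.find t [a] + 1 + 1) (by omega)
          have h2 := PySem.List.slice_from t (a := PySem.Chars.find t [a] + 1) (by omega)
          rw [h1, h2]
          have h3 : (PySem.Chars.find t [a] + 1 + 1).toNat = (PySem.Chars.find t [a] + 1).toNat + 1 := by omega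
          rw [h3, List.drop_succ_cons]
        rw [hs]
      · simp [hi]

theorem after1_contains (a b : Char) (s : List Char) :
    after1 a b s = true → s.contains b = true := by
  induction s with
  | nil => simp [after1]
  | cons c t ih =>
    simp only [after1]
    by_cases h : c = a
    · simp only [if_pos h]
      intro hb
      have hm : b ∈ t := by simpa using hb
      simp [List.contains_cons, hm]
    · simp only [if_neg h]
      intro hb
      have hm : b ∈ t := by simpa using ih hb
      simp [List.contains_cons, hm]

theorem scanPairs_inv (s : List Char) (sg sv : Bool) :
    scanPairs s sg sv =
      ((sg && s.contains 'M') || (sv && (s.contains 'N' || s.contains 'M')) ||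
        after1 'G' 'M' s || after1 'V' 'N' s || after1 'V' 'M' s) := by
  induction s generalizing sg sv with
  | nil => simp [scanPairs, after1]
  | cons c t ih =>
    have hGM := after1_contains 'G' 'M' t
    have hVN := after1_contains 'V' 'N' t
    have hVM := after1_contains 'V' 'M' t
    by_cases hM : c = 'M'
    · subst hM
      simp only [scanPairs, if_pos rfl, after1, List.contains_cons]
      rw [ih]
      cases sg <;> cases sv <;> simp <;>
        cases h : t.contains 'M' <;> simp_all <;> tauto
    · by_cases hN : c = 'N'
      · subst hN
        simp only [scanPairs, hM, if_false, if_pos rfl, after1, List.contains_cons]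
        rw [ih]
        cases sg <;> cases sv <;> simp_all <;> tauto
      · by_cases hG : c = 'G'
        · subst hG
          simp only [scanPairs, hM, hN, if_false, if_pos rfl, after1, List.contains_cons]
          rw [ih]
          cases sg <;> cases sv <;>
            cases h : t.contains 'M' <;> simp_all <;>
            cases h2 : after1 'G' 'M' t <;> simp_all <;> tauto
        · by_cases hV : c = 'V'
          · subst hV
            simp only [scanPairs, hM, hN, hG, if_false, if_pos rfl, after1, List.contains_cons]
            rw [ih]
            cases sg <;> cases sv <;>
              cases hm : t.contains 'M' <;> cases hn : t.contains 'N' <;> simp_all <;>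
              cases h2 : after1 'V' 'N' t <;> cases h3 : after1 'V' 'M' t <;> simp_all <;> tauto
          · simp only [scanPairs, hM, hN, hG, hV, if_false, after1, List.contains_cons]
            rw [ih]
            have hM' : ('M' == c) = false := beq_eq_false_iff_ne.mpr (fun e => hM e.symm)
            have hN' : ('N' == c) = false := beq_eq_false_iff_ne.mpr (fun e => hN e.symm)
            simp [hM', hN']

theorem postLoop_cons (str : String) (f : String × String) (rest : List (String × String)) :
    postLoop str (f :: rest) =
      ((PySem.Str.isIn f.1 str &&
        PySem.Str.isIn f.2 (PySem.Str.slice str (some (PySem.Str.find str f.1 + PySem.Str.len f.1)) none))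
        || postLoop str rest) := by
  by_cases h1 : PySem.Str.isIn f.1 str = true
  · by_cases h2 : PySem.Str.isIn f.2 (PySem.Str.slice str (some (PySem.Str.find str f.1 + PySem.Str.len f.1)) none) = true
    · simp_all [postLoop]
    · simp_all [postLoop]
  · simp_all [postLoop]

-- pairA with Str functions equals after1 on the underlying char list
theorem pairStr_eq (a b : Char) (sa sb str : String)
    (ha : sa.toList = [a]) (hb : sb.toList = [b]) :
    (PySem.Str.isIn sa str &&
      PySem.Str.isIn sb
        (PySem.Str.slice str (some (PySem.Str.find str sa + PySem.Str.len sa)) none))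
      = after1 a b str.toList := by
  rw [← pairA_eq_after1]
  have hlen : PySem.Str.len sa = 1 := by rw [PySem.Str.len_eq, ha]; rfl
  simp only [PySem.Str.isIn, PySem.Str.find, hlen, ha, hb]
  rw [PySem.Str.toList_slice]
  by_cases h : PySem.Chars.isIn [a] str.toList = true
  · simp [h]
  · simp [h]

theorem postLoop_eq_scan (str : String) :
    postLoop str forbiddenStrings = scanPairs str.toList false false := by
  rw [scanPairs_inv]
  show postLoop str [("G","M"), ("V","N"), ("V","M")] = _
  rw [postLoop_cons, postLoop_cons, postLoop_cons]
  rw [pairStr_eq 'G' 'M' "G" "M" str rfl rfl,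
    pairStr_eq 'V' 'N' "V" "N" str rfl rfl,
    pairStr_eq 'V' 'M' "V" "M" str rfl rfl]
  simp only [postLoop]
  simp [Bool.or_assoc]

-- ===== VERDICT (by name: the statement is the Claim_ definition above) =====
theorem post_filter_spec : Claim_equal_post_filter := by
  intro t _ _
  unfold Spec_post_filter post_filter post_filter_alt
  exact postLoop_eq_scan _
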